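-- pv_equiv track=rewrite | github.com/6210qwe/leetcode_py | leetcode_solutions/by_id/q3645.py | dfs
-- ===== SOURCE A (Python) =====
-- from typing import List
--
-- def dfs(node: int, parent: int, tree: List[List[int]], depth: int, even_counts: List[int], odd_counts: List[int]):
--     count = 1
--     for neighbor in tree[node]:
--         if neighbor != parent:
--             sub_count = dfs(neighbor, node, tree, depth + 1, even_counts, odd_counts)
--             count += sub_count
--             if depth % 2 == 0:
--                 even_counts[node] += sub_count
--             else:
--                 odd_counts[node] += sub_count
--     return count
-- ===== SOURCE B (Python) =====
-- # Iterative re-implementation: breadth-first level expansion followed by a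
-- # bottom-up (deepest level first) size accumulation, instead of A's recursion.
-- # Mutates even_counts/odd_counts in place exactly as A does.
-- from typing import List
--
--
-- def dfs(node: int, parent: int, tree: List[List[int]], depth: int, even_counts: List[int], odd_counts: List[int]):
--     # phase 1: expand level by level, recording each call as (vertex, parent)
--     levels = []
--     frontier = [(node, parent)]
--     while frontier:
--         levels.append(frontier)
--         nxt = []
--         for (u, p) in frontier:
--             for v in tree[u]:
--                 if v != p:
--                     nxt.append((v, u))
--         frontier = nxt
--     # phase 2: fold subtree sizes upwards, deepest level first
--     sizes = [1] * len(levels[-1])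
--     for k in range(len(levels) - 2, -1, -1):
--         child_sizes = sizes
--         cur = levels[k]
--         sizes = [1] * len(cur)
--         ci = 0
--         for i, (u, p) in enumerate(cur):
--             for v in tree[u]:
--                 if v != p:
--                     s = child_sizes[ci]
--                     ci += 1
--                     sizes[i] += s
--                     if (depth + k) % 2 == 0:
--                         even_counts[u] += s
--                     else:
--                         odd_counts[u] += s
--     return sizes[0]
-- ===== Notes on version B (the rewrite author's own statement) =====
-- stated objective: alternative
-- what changed: A's recursive DFS is replaced by a two-phase iteration: an explicit breadth-first level expansion collecting (vertex, parent) occurrences, then a bottom-up (deepest level first) fold that accumulates each occurrence's subtree size from its children's sizes and applies the same even/odd counts updates; the return value is the root occurrence's size.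
import Mathlib
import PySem

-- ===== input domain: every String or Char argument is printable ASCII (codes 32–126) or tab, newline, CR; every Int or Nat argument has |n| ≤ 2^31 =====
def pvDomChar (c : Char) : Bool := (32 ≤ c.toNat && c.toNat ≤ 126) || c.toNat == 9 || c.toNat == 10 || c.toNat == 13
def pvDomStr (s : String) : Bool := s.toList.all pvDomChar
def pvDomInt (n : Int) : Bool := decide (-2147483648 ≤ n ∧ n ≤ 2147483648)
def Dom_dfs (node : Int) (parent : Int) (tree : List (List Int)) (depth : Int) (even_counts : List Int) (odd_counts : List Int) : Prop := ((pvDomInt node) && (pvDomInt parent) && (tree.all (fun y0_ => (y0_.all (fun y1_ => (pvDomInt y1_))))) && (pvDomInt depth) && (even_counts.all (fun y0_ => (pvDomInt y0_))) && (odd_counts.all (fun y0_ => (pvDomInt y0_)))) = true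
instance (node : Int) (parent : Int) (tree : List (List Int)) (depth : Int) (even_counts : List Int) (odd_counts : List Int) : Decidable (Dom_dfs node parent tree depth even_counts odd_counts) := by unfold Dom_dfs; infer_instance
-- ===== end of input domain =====

-- B replaces A's recursive DFS by a two-phase iteration (BFS level expansion, then a
-- bottom-up fold of subtree sizes); same return value on every input admitted by Pre_dfs.
-- A mutates even_counts/odd_counts in place; B performs the same mutations in Python, and
-- the equivalence proved here is about the RETURN value.

-- ===== PORT A =====

-- xs[i] += v  (Python index semantics; in range whenever the Python runs it under Pre_dfs)
def pyAddAt (xs : List Int) (i v : Int) : List Int :=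
  PySem.List.pySetD xs i (PySem.List.pyGetD xs i 0 + v)

-- A's recursion, fueled for totality only: the fuel-0 and index-out-of-range fallbacks
-- (count 1, no expansion — 'as if tree[node] were empty') are never reached under Pre_dfs,
-- where Python A returns normally.  State threads (count, even_counts, odd_counts).
def dfsGo (tree : List (List Int)) : Nat → Int → Int → Int → List Int → List Int → Int × List Int × List Int
  | 0, _node, _parent, _depth, ec, oc => (1, ec, oc)
  | fuel+1, node, parent, depth, ec, oc =>
    (PySem.List.pyGetD tree node []).foldl
      (fun st neighbor =>
        if neighbor ≠ parent then
          let r := dfsGo tree fuel neighbor node (depth + 1) st.2.1 st.2.2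
          if PySem.Int.mod depth 2 = 0 then
            (st.1 + r.1, pyAddAt r.2.1 node r.1, r.2.2)
          else
            (st.1 + r.1, r.2.1, pyAddAt r.2.2 node r.1)
        else st)
      (1, ec, oc)

-- fuel bound: strictly more than the number of distinct call states (u, p, parity), so under
-- Pre_dfs (acyclic call-state graph) the fuel guard never fires
def pvFuel (tree : List (List Int)) : Nat :=
  2 * (tree.flatten.length + 2) * (tree.flatten.length + 2) + 2

def dfs (node : Int) (parent : Int) (tree : List (List Int)) (depth : Int) (even_counts : List Int) (odd_counts : List Int) : Int :=
  (dfsGo tree (pvFuel tree) node parent depth even_counts odd_counts).1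

-- ===== PORT B =====

-- phase 1 inner loops: the next BFS level, one (child, parent) pair per accepted neighbor
def nextLevel (tree : List (List Int)) (frontier : List (Int × Int)) : List (Int × Int) :=
  frontier.foldl
    (fun nxt up =>
      (PySem.List.pyGetD tree up.1 []).foldl
        (fun nxt v => if v ≠ up.2 then nxt ++ [(v, up.1)] else nxt) nxt)
    []

-- phase 1: the while loop collecting the levels (fueled for totality, as A's recursion is)
def buildLevels (tree : List (List Int)) : Nat → List (Int × Int) → List (List (Int × Int))
  | 0, _ => []
  | fuel+1, frontier =>
    if frontier.isEmpty then [] else frontier :: buildLevels tree fuel (nextLevel tree frontier)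

-- child_sizes[ci]; ci += 1  — the default 1 is only reachable when the level fuel was
-- exhausted (outside Pre_dfs); on a complete run the list never runs short
def popSize : List Int → Int × List Int
  | [] => (1, [])
  | s :: rest => (s, rest)

-- phase 2 inner loop body for one occurrence (u, p) of the current level: fold one child's
-- size into the occurrence's own size, updating the parity-selected counts list at u
def rowInnerStep (d u p : Int)
    (st2 : Int × List Int × List Int × List Int) (v : Int) : Int × List Int × List Int × List Int :=
  if v ≠ p then
    let s := (popSize st2.2.1).1
    let rest := (popSize st2.2.1).2
    if PySem.Int.mod d 2 = 0 then
      (st2.1 + s, rest, pyAddAt st2.2.2.1 u s, st2.2.2.2)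
    else
      (st2.1 + s, rest, st2.2.2.1, pyAddAt st2.2.2.2 u s)
  else st2

-- phase 2 loop body for one occurrence of the current level
def rowStep (tree : List (List Int)) (d : Int)
    (st : List Int × List Int × List Int × List Int) (up : Int × Int) :
    List Int × List Int × List Int × List Int :=
  let r := (PySem.List.pyGetD tree up.1 []).foldl (rowInnerStep d up.1 up.2)
    ((1 : Int), st.2.1, st.2.2.1, st.2.2.2)
  (st.1 ++ [r.1], r.2.1, r.2.2.1, r.2.2.2)

-- phase 2: deepest level first, each level's sizes computed from its children's sizes;
-- returns (sizes of the first given level, even_counts, odd_counts)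
def levelSizes (tree : List (List Int)) : Int → List (List (Int × Int)) → List Int → List Int → List Int × List Int × List Int
  | _d, [], ec, oc => ([], ec, oc)
  | d, cur :: rest, ec, oc =>
    let r := levelSizes tree (d + 1) rest ec oc
    let row := cur.foldl (rowStep tree d) ([], r.1, r.2.1, r.2.2)
    (row.1, row.2.2.1, row.2.2.2)

def dfs_alt (node : Int) (parent : Int) (tree : List (List Int)) (depth : Int) (even_counts : List Int) (odd_counts : List Int) : Int :=
  let levels := buildLevels tree (pvFuel tree) [(node, parent)]
  match (levelSizes tree depth levels even_counts odd_counts).1 with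
  | s :: _ => s
  | [] => 1   -- only when the fuel guard produced no levels (outside Pre_dfs)

-- ===== PRECONDITION & SPEC =====

-- The call states of A's recursion: (u, p, parity of depth); successors are the accepted
-- neighbors.  These are graph-shape data, not a run of A (no counts, no sizes).
def pvStateSuccs (tree : List (List Int)) (s : Int × Int × Int) : List (Int × Int × Int) :=
  ((PySem.List.pyGetD tree s.1 []).filter (fun v => v ≠ s.2.1)).map (fun v => (v, s.1, 1 - s.2.2))

-- valid Python index into a list of length n
def pvValidIdx (n : Nat) (u : Int) : Bool :=
  decide (0 < n) && decide (-(n : Int) ≤ u) && decide (u < (n : Int))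

-- at a state that folds in at least one child, tree[u] and the parity-selected counts list
-- are both indexed at u
def pvStateOK (tree : List (List Int)) (ec oc : List Int) (s : Int × Int × Int) : Bool :=
  pvValidIdx tree.length s.1 &&
    ((pvStateSuccs tree s).isEmpty ||
      pvValidIdx (if s.2.2 = 0 then ec.length else oc.length) s.1)

-- reachable call states (worklist closure; the fuel exceeds the number of distinct states)
def pvClose (tree : List (List Int)) : Nat → List (Int × Int × Int) → List (Int × Int × Int) → Option (List (Int × Int × Int))
  | 0, visited, frontier => if frontier.isEmpty then some visited else none
  | fuel+1, visited, frontier =>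
    match frontier with
    | [] => some visited
    | s :: rest =>
      let step := (pvStateSuccs tree s).foldl
        (fun (vf : List (Int × Int × Int) × List (Int × Int × Int)) t =>
          if vf.1.contains t then vf else (vf.1 ++ [t], vf.2 ++ [t]))
        (visited, rest)
      pvClose tree fuel step.1 step.2

-- acyclicity of the call-state graph by iterated sink elimination
def pvPrune (tree : List (List Int)) (states : List (Int × Int × Int)) : Nat → List (Int × Int × Int) → List (Int × Int × Int)
  | 0, removed => removed
  | fuel+1, removed =>
    pvPrune tree states fuel
      (states.filter (fun s => removed.contains s || (pvStateSuccs tree s).all (fun t => removed.contains t)))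

def pvPreB (node parent : Int) (tree : List (List Int)) (depth : Int) (ec oc : List Int) : Bool :=
  let s0 := (node, parent, PySem.Int.mod depth 2)
  match pvClose tree (pvFuel tree) [s0] [s0] with
  | none => false
  | some R =>
    R.all (fun s => pvStateOK tree ec oc s) &&
      (let removed := pvPrune tree R R.length []
       R.all (fun s => removed.contains s))

-- Pre_dfs is a condition on the SHAPE of the input graph, not a run of A (no counts or sizes
-- are computed): every call state (u, p, parity) reachable from (node, parent) indexes tree —
-- and, where a child is folded in, the parity-selected counts list — within Python range, and
-- the call-state graph is acyclic (decided by the standard finite closure + sink elimination).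
-- This holds exactly where Python A returns normally; it excludes exactly the inputs on which
-- A raises (IndexError, or RecursionError from an endless non-backtracking walk).
def Pre_dfs (node : Int) (parent : Int) (tree : List (List Int)) (depth : Int) (even_counts : List Int) (odd_counts : List Int) : Prop :=
  pvPreB node parent tree depth even_counts odd_counts = true

instance (node : Int) (parent : Int) (tree : List (List Int)) (depth : Int) (even_counts : List Int) (odd_counts : List Int) : Decidable (Pre_dfs node parent tree depth even_counts odd_counts) := by
  unfold Pre_dfs; infer_instance

def pvWitness_dfs : Int × Int × List (List Int) × Int × List Int × List Int :=
  (0, -1, [[1], [0]], 0, [0, 0], [0, 0])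

def Spec_dfs (node : Int) (parent : Int) (tree : List (List Int)) (depth : Int) (even_counts : List Int) (odd_counts : List Int) (out : Int) : Prop := out = dfs_alt node parent tree depth even_counts odd_counts
instance (node : Int) (parent : Int) (tree : List (List Int)) (depth : Int) (even_counts : List Int) (odd_counts : List Int) (out : Int) : Decidable (Spec_dfs node parent tree depth even_counts odd_counts out) := by unfold Spec_dfs; infer_instance

-- ===== CLAIM (what is proved, stated in full; the proofs are below) =====
def Claim_equal_dfs : Prop := ∀ (node : Int) (parent : Int) (tree : List (List Int)) (depth : Int) (even_counts : List Int) (odd_counts : List Int), Dom_dfs node parent tree depth even_counts odd_counts → Pre_dfs node parent tree depth even_counts odd_counts → Spec_dfs node parent tree depth even_counts odd_counts (dfs node parent tree depth even_counts odd_counts)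

-- ===== LEMMAS AND PROOFS =====

-- the common specification both ports are reduced to: the fueled call-tree size
def cnt (tree : List (List Int)) : Nat → Int → Int → Int
  | 0, _, _ => 1
  | f+1, u, p =>
    1 + (((PySem.List.pyGetD tree u []).filter (fun v => v ≠ p)).map (fun v => cnt tree f v u)).sum

-- A's count component is the fueled call-tree size (the counts lists never feed back into it)
theorem dfsGo_fst (tree : List (List Int)) :
    ∀ (f : Nat) (u p d : Int) (ec oc : List Int),
      (dfsGo tree f u p d ec oc).1 = cnt tree f u p := by
  intro f
  induction f with
  | zero => intro u p d ec oc; simp [dfsGo, cnt]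
  | succ f ih =>
    intro u p d ec oc
    suffices h : ∀ (L : List Int) (st : Int × List Int × List Int),
        (L.foldl
          (fun st neighbor =>
            if neighbor ≠ p then
              let r := dfsGo tree f neighbor u (d + 1) st.2.1 st.2.2
              if PySem.Int.mod d 2 = 0 then
                (st.1 + r.1, pyAddAt r.2.1 u r.1, r.2.2)
              else
                (st.1 + r.1, r.2.1, pyAddAt r.2.2 u r.1)
            else st) st).1
          = st.1 + ((L.filter (fun v => v ≠ p)).map (fun v => cnt tree f v u)).sum by
      simp only [dfsGo, cnt]
      rw [h]
    intro L
    induction L with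
    | nil => intro st; simp
    | cons v L ihL =>
      intro st
      rw [List.foldl_cons, ihL]
      by_cases hv : v ≠ p
      · simp [hv, ih]
        split_ifs <;> ring
      · simp [hv]

-- the (child, parent) pairs one occurrence contributes to the next level
def childrenOf (tree : List (List Int)) (up : Int × Int) : List (Int × Int) :=
  ((PySem.List.pyGetD tree up.1 []).filter (fun v => v ≠ up.2)).map (fun v => (v, up.1))

theorem nextLevel_eq (tree : List (List Int)) (frontier : List (Int × Int)) :
    nextLevel tree frontier = frontier.flatMap (childrenOf tree) := by
  suffices h : ∀ (fr : List (Int × Int)) (acc : List (Int × Int)),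
      fr.foldl
        (fun nxt up =>
          (PySem.List.pyGetD tree up.1 []).foldl
            (fun nxt v => if v ≠ up.2 then nxt ++ [(v, up.1)] else nxt) nxt) acc
        = acc ++ fr.flatMap (childrenOf tree) by
    simpa [nextLevel] using h frontier []
  intro fr
  induction fr with
  | nil => intro acc; simp
  | cons up fr ihf =>
    intro acc
    have hinner : ∀ (L : List Int) (acc2 : List (Int × Int)),
        L.foldl (fun nxt v => if v ≠ up.2 then nxt ++ [(v, up.1)] else nxt) acc2
          = acc2 ++ (L.filter (fun v => v ≠ up.2)).map (fun v => (v, up.1)) := by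
      intro L
      induction L with
      | nil => intro acc2; simp
      | cons v L ihL =>
        intro acc2
        rw [List.foldl_cons, ihL]
        by_cases hv : v ≠ up.2 <;> simp [hv]
    simp only [List.foldl_cons, hinner, ihf, List.flatMap_cons, childrenOf]
    simp

-- 4-tuple extensionality from the first two components
theorem quad_eta {α β γ δ : Type} (x : α × β × γ × δ) (a : α) (b : β)
    (h1 : x.1 = a) (h2 : x.2.1 = b) : x = (a, b, x.2.2.1, x.2.2.2) := by
  obtain ⟨x1, x2, x3, x4⟩ := x
  simp_all

-- inner row fold with aligned child sizes: consumes exactly its own children's sizes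
theorem rowInner (d u p : Int) (g : Int → Int) :
    ∀ (L : List Int) (s : Int) (cs rest ec oc : List Int),
      cs = (L.filter (fun v => v ≠ p)).map g ++ rest →
      (L.foldl (rowInnerStep d u p) (s, cs, ec, oc)).1
        = s + ((L.filter (fun v => v ≠ p)).map g).sum ∧
      (L.foldl (rowInnerStep d u p) (s, cs, ec, oc)).2.1 = rest := by
  intro L
  induction L with
  | nil => intro s cs rest ec oc hcs; simp at hcs; simp [hcs]
  | cons v L ihL =>
    intro s cs rest ec oc hcs
    rw [List.foldl_cons]
    by_cases hv : v ≠ p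
    · simp only [List.filter_cons, hv, ite_true, List.map_cons, List.cons_append, ne_eq,
        not_false_eq_true, decide_true] at hcs
      set X := rowInnerStep d u p (s, cs, ec, oc) v with hXdef
      have h1 : X.1 = s + g v := by
        rw [hXdef, hcs]; simp [rowInnerStep, hv, popSize]; split_ifs <;> simp
      have h2 : X.2.1 = (L.filter (fun v => v ≠ p)).map g ++ rest := by
        rw [hXdef, hcs]; simp [rowInnerStep, hv, popSize]; split_ifs <;> simp
      rw [quad_eta X _ _ h1 h2]
      obtain ⟨j1, j2⟩ := ihL (s + g v) ((L.filter (fun v => v ≠ p)).map g ++ rest) rest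
        X.2.2.1 X.2.2.2 rfl
      refine ⟨?_, j2⟩
      rw [j1]
      simp [hv]
      ring
    · have hstep : rowInnerStep d u p (s, cs, ec, oc) v = (s, cs, ec, oc) := by
        simp [rowInnerStep, hv]
      rw [hstep]
      simp only [List.filter_cons, hv] at hcs ⊢
      exact ihL s cs rest ec oc hcs

-- inner row fold with no child sizes left (level fuel exhausted): each accepted child counts 1
theorem rowInnerEmpty (d u p : Int) :
    ∀ (L : List Int) (s : Int) (ec oc : List Int),
      (L.foldl (rowInnerStep d u p) (s, ([] : List Int), ec, oc)).1
        = s + ((L.filter (fun v => v ≠ p)).length : Int) ∧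
      (L.foldl (rowInnerStep d u p) (s, ([] : List Int), ec, oc)).2.1 = [] := by
  intro L
  induction L with
  | nil => intro s ec oc; simp
  | cons v L ihL =>
    intro s ec oc
    rw [List.foldl_cons]
    by_cases hv : v ≠ p
    · set X := rowInnerStep d u p (s, ([] : List Int), ec, oc) v with hXdef
      have h1 : X.1 = s + 1 := by
        rw [hXdef]; simp [rowInnerStep, hv, popSize]; split_ifs <;> simp
      have h2 : X.2.1 = ([] : List Int) := by
        rw [hXdef]; simp [rowInnerStep, hv, popSize]; split_ifs <;> simp
      rw [quad_eta X _ _ h1 h2]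
      obtain ⟨j1, j2⟩ := ihL (s + 1) X.2.2.1 X.2.2.2
      refine ⟨?_, j2⟩
      rw [j1]
      simp [hv]
      ring
    · have hstep : rowInnerStep d u p (s, ([] : List Int), ec, oc) v = (s, [], ec, oc) := by
        simp [rowInnerStep, hv]
      rw [hstep]
      simp only [List.filter_cons, hv]
      exact ihL s ec oc

-- outer row fold with aligned child sizes: each occurrence's size is its fueled call-tree size
theorem rowFold (tree : List (List Int)) (d : Int) (f : Nat) :
    ∀ (cur : List (Int × Int)) (acc cs rest ec oc : List Int),
      cs = (cur.flatMap (childrenOf tree)).map (fun c => cnt tree f c.1 c.2) ++ rest →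
      (cur.foldl (rowStep tree d) (acc, cs, ec, oc)).1
        = acc ++ cur.map (fun up => cnt tree (f + 1) up.1 up.2) ∧
      (cur.foldl (rowStep tree d) (acc, cs, ec, oc)).2.1 = rest := by
  intro cur
  induction cur with
  | nil => intro acc cs rest ec oc hcs; simp at hcs; simp [hcs]
  | cons up cur ihc =>
    intro acc cs rest ec oc hcs
    simp only [List.flatMap_cons, List.map_append, List.append_assoc] at hcs
    rw [List.foldl_cons]
    have hmap : (childrenOf tree up).map (fun c => cnt tree f c.1 c.2)
        = ((PySem.List.pyGetD tree up.1 []).filter (fun v => v ≠ up.2)).map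
            (fun v => cnt tree f v up.1) := by
      simp [childrenOf, List.map_map, Function.comp]
    rw [hmap] at hcs
    obtain ⟨i1, i2⟩ := rowInner d up.1 up.2 (fun v => cnt tree f v up.1)
      (PySem.List.pyGetD tree up.1 []) 1 cs
      ((cur.flatMap (childrenOf tree)).map (fun c => cnt tree f c.1 c.2) ++ rest) ec oc hcs
    set X := rowStep tree d (acc, cs, ec, oc) up with hXdef
    have h1 : X.1 = acc ++ [cnt tree (f + 1) up.1 up.2] := by
      rw [hXdef, rowStep]
      simp only []
      rw [i1, cnt]
    have h2 : X.2.1 = (cur.flatMap (childrenOf tree)).map (fun c => cnt tree f c.1 c.2) ++ rest := by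
      rw [hXdef, rowStep]
      simp only []
      rw [i2]
    rw [quad_eta X _ _ h1 h2]
    obtain ⟨j1, j2⟩ := ihc (acc ++ [cnt tree (f + 1) up.1 up.2])
      ((cur.flatMap (childrenOf tree)).map (fun c => cnt tree f c.1 c.2) ++ rest) rest
      X.2.2.1 X.2.2.2 rfl
    refine ⟨?_, j2⟩
    rw [j1]
    simp

-- the deepest stored level: with no child sizes, each occurrence gets its one-level size
theorem rowFoldEmpty (tree : List (List Int)) (d : Int) :
    ∀ (cur : List (Int × Int)) (acc ec oc : List Int),
      (cur.foldl (rowStep tree d) (acc, ([] : List Int), ec, oc)).1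
        = acc ++ cur.map (fun up => cnt tree 1 up.1 up.2) ∧
      (cur.foldl (rowStep tree d) (acc, ([] : List Int), ec, oc)).2.1 = [] := by
  intro cur
  induction cur with
  | nil => intro acc ec oc; simp
  | cons up cur ihc =>
    intro acc ec oc
    rw [List.foldl_cons]
    obtain ⟨i1, i2⟩ := rowInnerEmpty d up.1 up.2 (PySem.List.pyGetD tree up.1 []) 1 ec oc
    have hone : cnt tree 1 up.1 up.2
        = 1 + (((PySem.List.pyGetD tree up.1 []).filter (fun v => v ≠ up.2)).length : Int) := by
      rw [cnt]
      congr 1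
      rw [show (fun v => cnt tree 0 v up.1) = fun _ => (1 : Int) by funext v; rw [cnt]]
      simp [List.map_const']
    set X := rowStep tree d (acc, ([] : List Int), ec, oc) up with hXdef
    have h1 : X.1 = acc ++ [cnt tree 1 up.1 up.2] := by
      rw [hXdef, rowStep]
      simp only []
      rw [i1, hone]
    have h2 : X.2.1 = ([] : List Int) := by
      rw [hXdef, rowStep]
      simp only []
      rw [i2]
    rw [quad_eta X _ _ h1 h2]
    obtain ⟨j1, j2⟩ := ihc (acc ++ [cnt tree 1 up.1 up.2]) X.2.2.1 X.2.2.2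
    refine ⟨?_, j2⟩
    rw [j1]
    simp

-- main level lemma: phase 2 over phase 1's levels yields the fueled call-tree sizes
theorem levelsSizes (tree : List (List Int)) :
    ∀ (f : Nat) (frontier : List (Int × Int)) (d : Int) (ec oc : List Int),
      (levelSizes tree d (buildLevels tree (f + 1) frontier) ec oc).1
        = frontier.map (fun up => cnt tree (f + 1) up.1 up.2) := by
  intro f
  induction f with
  | zero =>
    intro frontier d ec oc
    by_cases hfr : frontier.isEmpty
    · rw [List.isEmpty_iff.mp hfr]
      simp [buildLevels, levelSizes]
    · rw [buildLevels, if_neg hfr]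
      rw [show buildLevels tree 0 (nextLevel tree frontier) = [] from rfl]
      rw [levelSizes, levelSizes]
      exact (rowFoldEmpty tree d frontier [] ec oc).1
  | succ f ihf =>
    intro frontier d ec oc
    by_cases hfr : frontier.isEmpty
    · rw [List.isEmpty_iff.mp hfr]
      simp [buildLevels, levelSizes]
    · rw [buildLevels, if_neg hfr]
      rw [levelSizes]
      have hcs : (levelSizes tree (d + 1) (buildLevels tree (f + 1) (nextLevel tree frontier)) ec oc).1
          = (frontier.flatMap (childrenOf tree)).map (fun c => cnt tree (f + 1) c.1 c.2) ++ [] := by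
        rw [ihf (nextLevel tree frontier) (d + 1) ec oc, nextLevel_eq]
        simp
      exact (rowFold tree d (f + 1) frontier [] _ [] _ _ hcs).1

-- ===== VERDICT (by name: the statement is the Claim_ definition above) =====
theorem dfs_spec : Claim_equal_dfs := by
  intro node parent tree depth ec oc _hDom _hPre
  show dfs node parent tree depth ec oc = dfs_alt node parent tree depth ec oc
  obtain ⟨f, hf⟩ : ∃ f, pvFuel tree = f + 1 :=
    ⟨2 * (tree.flatten.length + 2) * (tree.flatten.length + 2) + 1, rfl⟩
  simp only [dfs, dfs_alt, hf]
  rw [dfsGo_fst, levelsSizes]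
  simp
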